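-- pv_equiv track=rewrite | github.com/AK1089/ak1089.github.io | maths/n-dimensional-chess/bishop/verify.py | multiset_supports_pattern
-- ===== SOURCE A (Python) =====
-- def capped_add_counts(counts: tuple[int, int, int], mask: int) -> tuple[int, int, int]:
--     return (
--         min(2, counts[0] + ((mask >> 0) & 1)),
--         min(2, counts[1] + ((mask >> 1) & 1)),
--         min(2, counts[2] + ((mask >> 2) & 1)),
--     )
--
-- def multiset_supports_pattern(
--     pair_indices: tuple[int, ...],
--     mask_lookup: tuple[tuple[int, ...], ...],
-- ) -> bool:
--     """Check a whole coordinate multiset using only support masks.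
--
--     The actual signed increments are independent across coordinates; the only cross-coordinate
--     coupling is the "at least two active axes per move" rule. Support masks therefore retain
--     exactly the data that matters for the 4D verification.
--     """
--
--     states = {(0, 0, 0)}
--     for pair_index in pair_indices:
--         next_states = set()
--         for counts in states:
--             for mask in mask_lookup[pair_index]:
--                 next_states.add(capped_add_counts(counts, mask))
--         states = next_states
--     return (2, 2, 2) in states
-- ===== SOURCE B (Python) =====
-- def capped_add_counts(counts, mask):
--     return (
--         min(2, counts[0] + ((mask >> 0) & 1)),
--         min(2, counts[1] + ((mask >> 1) & 1)),
--         min(2, counts[2] + ((mask >> 2) & 1)),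
--     )
--
-- def multiset_supports_pattern(pair_indices, mask_lookup):
--     states27 = [(a, b, c) for a in range(3) for b in range(3) for c in range(3)]
--     good = {(2, 2, 2)}
--     for pair_index in reversed(pair_indices):
--         masks = mask_lookup[pair_index]
--         good = {s for s in states27
--                 if any(capped_add_counts(s, m) in good for m in masks)}
--     return (0, 0, 0) in good
-- ===== Notes on version B (the rewrite author's own statement) =====
-- stated objective: alternative
-- what changed: B computes reachability backward: starting from {(2,2,2)} it sweeps pair_indices in reverse, keeping the set of the 27 capped-count states that can still reach the target, instead of A's forward image computation over reached states; the answer is whether (0,0,0) survives.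
-- outside the precondition, e.g. on multiset_supports_pattern((0, 1), ((),)): A returns False, B raises IndexError
import Mathlib
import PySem

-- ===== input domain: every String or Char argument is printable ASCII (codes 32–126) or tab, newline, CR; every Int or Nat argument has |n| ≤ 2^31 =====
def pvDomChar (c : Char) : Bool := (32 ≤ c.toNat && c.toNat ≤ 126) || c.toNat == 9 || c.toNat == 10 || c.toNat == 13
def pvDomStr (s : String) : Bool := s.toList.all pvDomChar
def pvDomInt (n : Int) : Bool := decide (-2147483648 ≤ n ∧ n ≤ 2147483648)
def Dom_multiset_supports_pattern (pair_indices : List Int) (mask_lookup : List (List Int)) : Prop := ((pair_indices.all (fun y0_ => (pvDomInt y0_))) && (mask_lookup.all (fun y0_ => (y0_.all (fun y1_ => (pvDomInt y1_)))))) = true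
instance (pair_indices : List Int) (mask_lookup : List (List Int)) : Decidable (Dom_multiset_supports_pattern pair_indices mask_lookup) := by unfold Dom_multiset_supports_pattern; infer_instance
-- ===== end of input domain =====

-- B replaces A's forward BFS over reached capped-count states by a backward pass over the
-- fixed 27-state space {0,1,2}^3, maintaining the set of states that can still reach (2,2,2);
-- objective: alternative decomposition (same asymptotic cost).

-- ===== PORT A =====
-- shared helper: Python capped_add_counts (identical in Source A and Source B)
def cappedAddCounts (counts : Int × Int × Int) (mask : Int) : Int × Int × Int :=
  (min 2 (counts.1 + PySem.Int.band (mask >>> (0 : Nat)) 1),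
   min 2 (counts.2.1 + PySem.Int.band (mask >>> (1 : Nat)) 1),
   min 2 (counts.2.2 + PySem.Int.band (mask >>> (2 : Nat)) 1))

def multiset_supports_pattern (pair_indices : List Int) (mask_lookup : List (List Int)) : Bool :=
  let states :=
    pair_indices.foldl
      (fun states pair_index =>
        states.foldl
          (fun next_states counts =>
            (PySem.List.pyGetD mask_lookup pair_index []).foldl
              (fun next_states mask => PySem.Set.add next_states (cappedAddCounts counts mask))
              next_states)
          PySem.Set.empty)
      (PySem.Set.ofList [((0 : Int), (0 : Int), (0 : Int))])
  PySem.Set.contains states (2, 2, 2)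

-- ===== PORT B =====
-- the 27 states {0,1,2}^3, as in Source B's comprehension over range(3)
def allStates27 : List (Int × Int × Int) :=
  (PySem.List.pyRange 0 3 1).flatMap fun a =>
    (PySem.List.pyRange 0 3 1).flatMap fun b =>
      (PySem.List.pyRange 0 3 1).map fun c => (a, b, c)

def multiset_supports_pattern_alt (pair_indices : List Int) (mask_lookup : List (List Int)) : Bool :=
  let good :=
    pair_indices.reverse.foldl
      (fun good pair_index =>
        let masks := PySem.List.pyGetD mask_lookup pair_index []
        PySem.Set.ofList
          (allStates27.filter fun s =>
            masks.any fun m => PySem.Set.contains good (cappedAddCounts s m)))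
      (PySem.Set.ofList [((2 : Int), (2 : Int), (2 : Int))])
  PySem.Set.contains good (0, 0, 0)

-- ===== PRECONDITION & SPEC =====
-- Pre_ excludes inputs containing an out-of-range pair index: there Python A raises IndexError,
-- except when the reached state set is already empty, where A lazily skips the lookup and
-- returns False while B (which always indexes) raises.
def Pre_multiset_supports_pattern (pair_indices : List Int) (mask_lookup : List (List Int)) : Prop :=
  ∀ p ∈ pair_indices, PySem.Raise.InRange mask_lookup.length p

instance (pair_indices : List Int) (mask_lookup : List (List Int)) : Decidable (Pre_multiset_supports_pattern pair_indices mask_lookup) := by unfold Pre_multiset_supports_pattern; infer_instance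

def pvWitness_multiset_supports_pattern : List Int × List (List Int) := ([0, 0], [[7, 3]])

def Spec_multiset_supports_pattern (pair_indices : List Int) (mask_lookup : List (List Int)) (out : Bool) : Prop := out = multiset_supports_pattern_alt pair_indices mask_lookup
instance (pair_indices : List Int) (mask_lookup : List (List Int)) (out : Bool) : Decidable (Spec_multiset_supports_pattern pair_indices mask_lookup out) := by unfold Spec_multiset_supports_pattern; infer_instance

-- ===== CLAIM (what is proved, stated in full; the proofs are below) =====
def Claim_equal_multiset_supports_pattern : Prop := ∀ (pair_indices : List Int) (mask_lookup : List (List Int)), Dom_multiset_supports_pattern pair_indices mask_lookup → Pre_multiset_supports_pattern pair_indices mask_lookup → Spec_multiset_supports_pattern pair_indices mask_lookup (multiset_supports_pattern pair_indices mask_lookup)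

-- ===== LEMMAS AND PROOFS =====

lemma band_one_bounds (a : Int) : 0 ≤ PySem.Int.band a 1 ∧ PySem.Int.band a 1 ≤ 1 := by
  unfold PySem.Int.band
  split_ifs with h h1 h2
  · have : a.toNat &&& (1 : Int).toNat = a.toNat % 2 := Nat.and_one_is_mod _
    simp only [this]
    omega
  · omega
  · have hb : (1 : Int).toNat &&& (-a - 1).toNat ≤ 1 := Nat.and_le_left
    omega
  · omega

lemma mem_allStates27 (s : Int × Int × Int) :
    s ∈ allStates27 ↔ (0 ≤ s.1 ∧ s.1 ≤ 2) ∧ (0 ≤ s.2.1 ∧ s.2.1 ≤ 2) ∧ (0 ≤ s.2.2 ∧ s.2.2 ≤ 2) := by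
  have h3 : PySem.List.pyRange 0 3 1 = [0, 1, 2] := by decide
  obtain ⟨a, b, c⟩ := s
  simp only [allStates27, h3, List.mem_flatMap, List.mem_map, List.mem_cons,
    List.not_mem_nil, or_false, Prod.mk.injEq]
  constructor
  · rintro ⟨x, hx, y, hy, z, hz, h1, h2, h3⟩
    obtain ⟨rfl, rfl, rfl⟩ : x = a ∧ y = b ∧ z = c := ⟨h1, h2, h3⟩
    rcases hx with rfl | rfl | rfl <;> rcases hy with rfl | rfl | rfl <;>
      rcases hz with rfl | rfl | rfl <;> norm_num
  · rintro ⟨⟨ha0, ha2⟩, ⟨hb0, hb2⟩, ⟨hc0, hc2⟩⟩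
    exact ⟨a, by omega, b, by omega, c, by omega, rfl, rfl, rfl⟩

lemma capped_mem_allStates27 (c : Int × Int × Int) (m : Int)
    (hc : c ∈ allStates27) : cappedAddCounts c m ∈ allStates27 := by
  rw [mem_allStates27] at hc ⊢
  obtain ⟨h0, h1, h2⟩ := hc
  have b0 := band_one_bounds (m >>> (0 : Nat))
  have b1 := band_one_bounds (m >>> (1 : Nat))
  have b2 := band_one_bounds (m >>> (2 : Nat))
  simp only [cappedAddCounts]
  omega

lemma mem_foldl_add_masks (c : Int × Int × Int) (masks : List Int)
    (ns : PySem.Set (Int × Int × Int)) (y : Int × Int × Int) :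
    y ∈ masks.foldl (fun ns m => PySem.Set.add ns (cappedAddCounts c m)) ns ↔
      y ∈ ns ∨ ∃ m ∈ masks, y = cappedAddCounts c m := by
  induction masks generalizing ns with
  | nil => simp
  | cons m rest ih =>
    simp only [List.foldl_cons, ih, PySem.Set.mem_add, List.mem_cons]
    constructor
    · rintro ((h | rfl) | ⟨m', hm', rfl⟩)
      · exact Or.inl h
      · exact Or.inr ⟨m, Or.inl rfl, rfl⟩
      · exact Or.inr ⟨m', Or.inr hm', rfl⟩
    · rintro (h | ⟨m', (rfl | hm'), rfl⟩)
      · exact Or.inl (Or.inl h)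
      · exact Or.inl (Or.inr rfl)
      · exact Or.inr ⟨m', hm', rfl⟩

lemma mem_step (S : List (Int × Int × Int)) (masks : List Int)
    (ns : PySem.Set (Int × Int × Int)) (y : Int × Int × Int) :
    y ∈ S.foldl (fun ns c => masks.foldl (fun ns m => PySem.Set.add ns (cappedAddCounts c m)) ns) ns ↔
      y ∈ ns ∨ ∃ c ∈ S, ∃ m ∈ masks, y = cappedAddCounts c m := by
  induction S generalizing ns with
  | nil => simp
  | cons c rest ih =>
    simp only [List.foldl_cons, ih, mem_foldl_add_masks, List.mem_cons]
    constructor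
    · rintro ((h | ⟨m, hm, rfl⟩) | ⟨c', hc', hrest⟩)
      · exact Or.inl h
      · exact Or.inr ⟨c, Or.inl rfl, m, hm, rfl⟩
      · exact Or.inr ⟨c', Or.inr hc', hrest⟩
    · rintro (h | ⟨c', (rfl | hc'), m, hm, rfl⟩)
      · exact Or.inl (Or.inl h)
      · exact Or.inl (Or.inr ⟨m, hm, rfl⟩)
      · exact Or.inr ⟨c', hc', m, hm, rfl⟩

lemma key (mask_lookup : List (List Int)) (l : List Int) :
    ∀ (S : List (Int × Int × Int)), (∀ s ∈ S, s ∈ allStates27) →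
    (((2 : Int), (2 : Int), (2 : Int)) ∈
        l.foldl
          (fun states pair_index =>
            states.foldl
              (fun next_states counts =>
                (PySem.List.pyGetD mask_lookup pair_index []).foldl
                  (fun next_states mask => PySem.Set.add next_states (cappedAddCounts counts mask))
                  next_states)
              PySem.Set.empty)
          S ↔
      ∃ s ∈ S, s ∈
        l.foldr
          (fun pair_index good =>
            PySem.Set.ofList
              (allStates27.filter fun s =>
                (PySem.List.pyGetD mask_lookup pair_index []).any fun m =>
                  PySem.Set.contains good (cappedAddCounts s m)))
          (PySem.Set.ofList [((2 : Int), (2 : Int), (2 : Int))])) := by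
  induction l with
  | nil =>
    intro S _
    simp [PySem.Set.mem_ofList]
  | cons p l ih =>
    intro S hS
    rw [List.foldl_cons, List.foldr_cons]
    have hstep : ∀ s ∈ (S.foldl
        (fun next_states counts =>
          (PySem.List.pyGetD mask_lookup p []).foldl
            (fun next_states mask => PySem.Set.add next_states (cappedAddCounts counts mask))
            next_states)
        PySem.Set.empty), s ∈ allStates27 := by
      intro s hs
      rw [mem_step] at hs
      rcases hs with h | ⟨c, hc, m, _, rfl⟩
      · simp [PySem.Set.empty] at h
      · exact capped_mem_allStates27 c m (hS c hc)
    rw [ih _ hstep]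
    constructor
    · rintro ⟨s', hs', hgood⟩
      rw [mem_step] at hs'
      rcases hs' with h | ⟨c, hc, m, hm, rfl⟩
      · simp [PySem.Set.empty] at h
      · refine ⟨c, hc, ?_⟩
        rw [PySem.Set.mem_ofList, List.mem_filter]
        refine ⟨hS c hc, ?_⟩
        rw [List.any_eq_true]
        exact ⟨m, hm, (PySem.Set.contains_iff _ _).mpr hgood⟩
    · rintro ⟨s, hs, hback⟩
      rw [PySem.Set.mem_ofList, List.mem_filter, List.any_eq_true] at hback
      obtain ⟨-, m, hm, hcont⟩ := hback
      refine ⟨cappedAddCounts s m, ?_, (PySem.Set.contains_iff _ _).mp hcont⟩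
      rw [mem_step]
      exact Or.inr ⟨s, hs, m, hm, rfl⟩

-- ===== VERDICT (by name: the statement is the Claim_ definition above) =====
theorem multiset_supports_pattern_spec : Claim_equal_multiset_supports_pattern := by
  intro pair_indices mask_lookup _dom _pre
  unfold Spec_multiset_supports_pattern multiset_supports_pattern multiset_supports_pattern_alt
  rw [List.foldl_reverse]
  rw [Bool.eq_iff_iff, PySem.Set.contains_iff, PySem.Set.contains_iff]
  have h0 : ((0 : Int), (0 : Int), (0 : Int)) ∈ allStates27 := by decide
  rw [key mask_lookup pair_indices (PySem.Set.ofList [((0 : Int), (0 : Int), (0 : Int))])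
        (by intro s hs; rw [PySem.Set.mem_ofList] at hs; simp only [List.mem_cons, List.not_mem_nil, or_false] at hs; subst hs; exact h0)]
  constructor
  · rintro ⟨s, hs, h⟩
    rw [PySem.Set.mem_ofList] at hs
    simp only [List.mem_cons, List.not_mem_nil, or_false] at hs
    subst hs; exact h
  · intro h
    exact ⟨_, by rw [PySem.Set.mem_ofList]; simp, h⟩
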